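-- pv_equiv track=rewrite | github.com/Nikunj-Gupta/autonomous-decision-making | code/test.py | adjacent_room
-- ===== SOURCE A (Python) =====
-- def cartesianVH(x, y):
--     return [(x-1, y), (x, y-1), (x, y+1), (x+1,y)]
--
-- def adjacent_room(data, exit):
--
--     exit_rooms = {}
--
--     for x,y in exit:
--         exit_rooms[(x, y)] = []
--         lists = cartesianVH(x,y)
--         for room_number, subdata in data.items():
--             for item in lists:
--                 if item in subdata:
--                     exit_rooms[(x,y)].append("Room - " + str(room_number))
--
--     return exit_rooms
-- ===== SOURCE B (Python) =====
-- def adjacent_room(data, exit):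
--     # Inverted index: cell -> set of room positions; each exit looks up its 4
--     # neighbours and sorts the hit indices to recover room (data) order.
--     rooms = list(data.items())
--     cell_rooms = {}
--     for idx, (room_number, subdata) in enumerate(rooms):
--         for cell in subdata:
--             cell_rooms.setdefault(cell, set()).add(idx)
--     exit_rooms = {}
--     for x, y in exit:
--         hits = []
--         for nb in ((x - 1, y), (x, y - 1), (x, y + 1), (x + 1, y)):
--             hits.extend(cell_rooms.get(nb, ()))
--         hits.sort()
--         exit_rooms[(x, y)] = ["Room - " + str(rooms[i][0]) for i in hits]
--     return exit_rooms
-- ===== Notes on version B (the rewrite author's own statement) =====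
-- stated objective: faster
-- what changed: B builds an inverted index mapping each cell to the set of room positions containing it, then answers every exit with 4 index lookups whose hit indices are sorted back into room order, instead of A's rescan of every room's whole cell list for each of the 4 neighbours of each exit.
import Mathlib
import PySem

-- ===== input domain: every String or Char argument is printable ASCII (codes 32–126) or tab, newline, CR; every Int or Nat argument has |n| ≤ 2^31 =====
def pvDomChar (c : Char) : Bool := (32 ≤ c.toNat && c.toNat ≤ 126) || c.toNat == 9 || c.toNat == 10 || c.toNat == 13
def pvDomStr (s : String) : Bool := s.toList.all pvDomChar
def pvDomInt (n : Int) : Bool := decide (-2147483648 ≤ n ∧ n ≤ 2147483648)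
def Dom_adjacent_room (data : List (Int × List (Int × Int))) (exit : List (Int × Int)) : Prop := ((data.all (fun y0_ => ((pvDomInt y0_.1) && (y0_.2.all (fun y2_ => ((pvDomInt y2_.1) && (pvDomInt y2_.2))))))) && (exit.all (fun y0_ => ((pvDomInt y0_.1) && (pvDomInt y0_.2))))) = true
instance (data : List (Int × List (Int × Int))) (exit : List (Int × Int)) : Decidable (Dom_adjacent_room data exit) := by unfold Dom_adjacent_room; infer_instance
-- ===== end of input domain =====

-- B replaces A's per-exit rescan of every room by an inverted index cell -> room indices,
-- looking up each exit's 4 neighbours and sorting the hit indices — objective: faster.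

-- ===== PORT A =====
def cartesianVH (x y : Int) : List (Int × Int) :=
  [(x - 1, y), (x, y - 1), (x, y + 1), (x + 1, y)]

def adjacent_room (data : List (Int × List (Int × Int))) (exit : List (Int × Int)) : List (Int × Int × List String) :=
  (exit.foldl (fun (er : PySem.Dict (Int × Int) (List String)) e =>
      let er := er.insert e []
      let lists := cartesianVH e.1 e.2
      data.foldl (fun er rs =>
        lists.foldl (fun er item =>
          if rs.2.contains item then
            er.modify e [] (fun v => v ++ ["Room - " ++ PySem.Int.toStr rs.1])
          else er) er) er)
    PySem.Dict.empty).items.map (fun p => (p.1.1, p.1.2, p.2))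

-- ===== PORT B =====
def adjacent_room_alt (data : List (Int × List (Int × Int))) (exit : List (Int × Int)) : List (Int × Int × List String) :=
  let rooms := data
  let cell_rooms := (PySem.List.enumerate rooms 0).foldl
    (fun (d : PySem.Dict (Int × Int) (PySem.Set Int)) p =>
      p.2.2.foldl (fun d cell => d.modify cell PySem.Set.empty (fun s => PySem.Set.add s p.1)) d)
    PySem.Dict.empty
  (exit.foldl (fun (er : PySem.Dict (Int × Int) (List String)) e =>
      let hits := [(e.1 - 1, e.2), (e.1, e.2 - 1), (e.1, e.2 + 1), (e.1 + 1, e.2)].foldl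
        (fun (hits : List Int) nb => hits ++ cell_rooms.getD nb []) []
      let hits := PySem.List.sorted hits (fun i => i) false
      er.insert e (hits.map (fun i =>
        "Room - " ++ PySem.Int.toStr ((PySem.List.pyGet? rooms i).getD (0, [])).1)))
    PySem.Dict.empty).items.map (fun p => (p.1.1, p.1.2, p.2))

-- ===== PRECONDITION & SPEC =====
def Spec_adjacent_room (data : List (Int × List (Int × Int))) (exit : List (Int × Int)) (out : List (Int × Int × List String)) : Prop := out = adjacent_room_alt data exit
instance (data : List (Int × List (Int × Int))) (exit : List (Int × Int)) (out : List (Int × Int × List String)) : Decidable (Spec_adjacent_room data exit out) := by unfold Spec_adjacent_room; infer_instance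

-- ===== CLAIM =====
def Claim_equal_adjacent_room : Prop := ∀ (data : List (Int × List (Int × Int))) (exit : List (Int × Int)), Dom_adjacent_room data exit → Spec_adjacent_room data exit (adjacent_room data exit)

-- ===== LEMMAS AND PROOFS =====

-- the per-room label and the labels one room `rs` contributes to exit cell `e` in A's order
def pvLbl (rs : Int × List (Int × Int)) : String := "Room - " ++ PySem.Int.toStr rs.1
def pvRow (e : Int × Int) (rs : Int × List (Int × Int)) : List String :=
  ((cartesianVH e.1 e.2).filter (fun it => rs.2.contains it)).map (fun _ => pvLbl rs)
def pvL (data : List (Int × List (Int × Int))) (e : Int × Int) : List String :=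
  data.flatMap (pvRow e)

-- A side: the innermost loop appends the filtered labels at the just-inserted key
theorem pvA1 (l : List (Int × Int)) (p : (Int × Int) → Bool) (s : String)
    (d : PySem.Dict (Int × Int) (List String)) (k : Int × Int) (acc : List String) :
    l.foldl (fun d it => if p it then d.modify k [] (fun v => v ++ [s]) else d) (d.insert k acc)
      = d.insert k (acc ++ (l.filter p).map (fun _ => s)) := by
  induction l generalizing acc with
  | nil => simp
  | cons a t ih =>
    rw [List.foldl_cons]
    by_cases h : p a = true
    · have hstep : (if p a = true then (d.insert k acc).modify k [] (fun v => v ++ [s])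
          else d.insert k acc) = d.insert k (acc ++ [s]) := by
        rw [if_pos h]
        simp [PySem.Dict.modify, PySem.Dict.getD_insert_self, PySem.Dict.insert_insert_self]
      rw [hstep, ih (acc ++ [s]), List.filter_cons, if_pos h, List.map_cons, List.append_assoc,
        List.singleton_append]
    · rw [if_neg h, ih acc, List.filter_cons, if_neg h]

-- A side: the data loop at a fixed exit key accumulates pvL
theorem pvA2 (data : List (Int × List (Int × Int))) (e : Int × Int)
    (d : PySem.Dict (Int × Int) (List String)) (acc : List String) :
    data.foldl (fun d rs =>
        (cartesianVH e.1 e.2).foldl (fun d it =>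
          if rs.2.contains it then d.modify e [] (fun v => v ++ [pvLbl rs]) else d) d)
      (d.insert e acc)
      = d.insert e (acc ++ pvL data e) := by
  induction data generalizing acc with
  | nil => simp [pvL]
  | cons rs t ih =>
    simp only [List.foldl_cons, pvA1, ih, pvL, List.flatMap_cons, pvRow, List.append_assoc]

def pvFA (data : List (Int × List (Int × Int))) (exit : List (Int × Int)) :
    PySem.Dict (Int × Int) (List String) :=
  exit.foldl (fun d e => d.insert e (pvL data e)) PySem.Dict.empty

theorem pvAside (data : List (Int × List (Int × Int))) (exit : List (Int × Int)) :
    adjacent_room data exit = (pvFA data exit).items.map (fun p => (p.1.1, p.1.2, p.2)) := by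
  unfold adjacent_room pvFA
  congr 2
  apply PySem.List.foldl_congr_mem
  intro d e _
  show (data.foldl _ (d.insert e [])) = _
  have := pvA2 data e d []
  simpa [pvLbl] using this

-- ==== B side ====

-- the inverted index
def pvCR (data : List (Int × List (Int × Int))) : PySem.Dict (Int × Int) (PySem.Set Int) :=
  (PySem.List.enumerate data 0).foldl
    (fun d p => p.2.2.foldl (fun d cell => d.modify cell PySem.Set.empty (fun s => PySem.Set.add s p.1)) d)
    PySem.Dict.empty

-- inner fold of one room: effect on the bucket of a cell nb
theorem pvB1 (rs2 : List (Int × Int)) (i : Int) (d : PySem.Dict (Int × Int) (PySem.Set Int))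
    (nb : Int × Int) :
    (rs2.foldl (fun d cell => d.modify cell PySem.Set.empty (fun s => PySem.Set.add s i)) d).getD nb []
      = if rs2.contains nb then PySem.Set.add (d.getD nb []) i else d.getD nb [] := by
  induction rs2 generalizing d with
  | nil => simp
  | cons a t ih =>
    rw [List.foldl_cons, ih]
    have hm : ∀ k' : Int × Int,
        ((d.modify a [] (fun s => PySem.Set.add s i)).getD k' [])
          = if k' = a then PySem.Set.add (d.getD a []) i else d.getD k' [] := by
      intro k'
      simpa using PySem.Dict.getD_modify (d := d) (k := a) (k' := k')
        (d0 := ([] : PySem.Set Int)) (f := fun s => PySem.Set.add s i)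
    by_cases ht : t.contains nb = true <;> by_cases ha : nb = a <;> simp_all

-- the full index: each bucket is the increasing list of matching room indices
theorem pvB2 (data : List (Int × List (Int × Int))) (st : Nat)
    (d : PySem.Dict (Int × Int) (PySem.Set Int))
    (hd : ∀ nb i, i ∈ d.getD nb [] → i < (st : Int)) (nb : Int × Int) :
    ((PySem.List.enumerate data (st : Int)).foldl
        (fun d p => p.2.2.foldl (fun d cell => d.modify cell PySem.Set.empty (fun s => PySem.Set.add s p.1)) d) d).getD nb []
      = d.getD nb []
        ++ ((PySem.List.enumerate data (st : Int)).filter (fun p => p.2.2.contains nb)).map (·.1) := by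
  induction data generalizing st d with
  | nil => simp [PySem.List.enumerate_nil]
  | cons a t ih =>
    rw [PySem.List.enumerate_cons, List.foldl_cons, List.filter_cons]
    have hstep := pvB1 a.2 (st : Int) d nb
    have hd' : ∀ nb' i,
        i ∈ (a.2.foldl (fun d cell => d.modify cell PySem.Set.empty
              (fun s => PySem.Set.add s (st : Int))) d).getD nb' [] →
          i < ((st + 1 : Nat) : Int) := by
      intro nb' i hi
      rw [pvB1] at hi
      by_cases hc : a.2.contains nb' = true
      · rw [if_pos hc] at hi
        rcases (PySem.Set.mem_add _ _ _).mp hi with h | h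
        · have := hd nb' i h; push_cast; omega
        · subst h; push_cast; omega
      · rw [if_neg hc] at hi
        have := hd nb' i hi; push_cast; omega
    have hcast : (st : Int) + 1 = ((st + 1 : Nat) : Int) := by push_cast; ring
    rw [hcast, ih (st + 1) _ hd', pvB1]
    by_cases hc : a.2.contains nb = true
    · have hns : (st : Int) ∉ d.getD nb [] := fun h => by have := hd nb _ h; omega
      have hadd : PySem.Set.add (d.getD nb []) (st : Int) = d.getD nb [] ++ [(st : Int)] := by
        simp [PySem.Set.add, PySem.Set.contains, hns]
      have hc' : nb ∈ a.2 := by simpa using hc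
      simp [hc', hadd, List.append_assoc]
    · have hc' : nb ∉ a.2 := by simpa using hc
      simp [hc']

theorem pvCR_getD (data : List (Int × List (Int × Int))) (nb : Int × Int) :
    (pvCR data).getD nb []
      = ((PySem.List.enumerate data 0).filter (fun p => p.2.2.contains nb)).map (·.1) := by
  have h := pvB2 data 0 PySem.Dict.empty
    (by intro nb i hi; simp [PySem.Dict.getD_empty] at hi) nb
  unfold pvCR
  simpa using h

-- a 0/1 replicate flatMap is a filtered map
theorem pvRep1 {β γ : Type} (ys : List β) (p : β → Bool) (f : β → γ) :
    ys.flatMap (fun b => List.replicate (if p b then 1 else 0) (f b)) = (ys.filter p).map f := by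
  induction ys with
  | nil => rfl
  | cons b t ih =>
    rw [List.flatMap_cons, List.filter_cons, ih]
    by_cases h : p b = true <;> simp [h]

-- a flatMap of pointwise appends splits, up to permutation
theorem pvFlatSplit {β γ : Type} (ys : List β) (g h : β → List γ) :
    (ys.flatMap (fun b => g b ++ h b)).Perm (ys.flatMap g ++ ys.flatMap h) := by
  induction ys with
  | nil => simp
  | cons b t ih =>
    simp only [List.flatMap_cons, List.append_assoc]
    refine ((ih.append_left (h b)).append_left (g b)).trans ?_
    exact (List.perm_append_comm_assoc (h b) (t.flatMap g) (t.flatMap h)).append_left (g b)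

-- generic transposition of a double scan, up to permutation
theorem pvTrans {α β γ : Type} (xs : List α) (ys : List β) (P : α → β → Bool) (f : β → γ) :
    (xs.flatMap (fun a => (ys.filter (fun b => P a b)).map f)).Perm
      (ys.flatMap (fun b => List.replicate (xs.countP (fun a => P a b)) (f b))) := by
  induction xs with
  | nil => simp
  | cons a t ih =>
    simp only [List.flatMap_cons, List.countP_cons]
    have hsplit : ys.flatMap
          (fun b => List.replicate (t.countP (fun x => P x b) + if P a b then 1 else 0) (f b))
        = ys.flatMap (fun b => List.replicate (t.countP (fun x => P x b)) (f b)
            ++ List.replicate (if P a b then 1 else 0) (f b)) :=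
      List.flatMap_congr (fun b _ => by rw [List.replicate_add])
    rw [hsplit]
    refine (List.perm_append_comm.trans (ih.append_right _)).trans ?_
    rw [← pvRep1 ys (fun b => P a b) f]
    exact (pvFlatSplit ys _ _).symm

-- the sorted hit list of one exit, named
def pvZ (data : List (Int × List (Int × Int))) (e : Int × Int) : List Int :=
  (PySem.List.enumerate data 0).flatMap
    (fun p => List.replicate ((cartesianVH e.1 e.2).countP (fun nb => p.2.2.contains nb)) p.1)

-- a flatMap of replicates over strictly increasing first components is sorted
theorem pvPairRep {α : Type} (l : List (Int × α)) (n : Int × α → Nat)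
    (h : l.Pairwise (fun p q => p.1 < q.1)) :
    (l.flatMap (fun p => List.replicate (n p) p.1)).Pairwise (fun x y => x ≤ y) := by
  induction l with
  | nil => simp
  | cons a t ih =>
    rcases List.pairwise_cons.mp h with ⟨ha, ht⟩
    rw [List.flatMap_cons]
    refine List.pairwise_append.mpr ⟨List.pairwise_replicate.mpr (Or.inr (le_refl a.1)), ih ht, ?_⟩
    intro x hx y hy
    rcases List.mem_flatMap.mp hy with ⟨q, hq, hyq⟩
    rw [List.eq_of_mem_replicate hx, List.eq_of_mem_replicate hyq]
    exact le_of_lt (ha q hq)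

theorem pvZ_pairwise (data : List (Int × List (Int × Int))) (e : Int × Int) :
    (pvZ data e).Pairwise (· ≤ ·) := by
  exact pvPairRep _ _ (PySem.List.pairwise_lt_enumerate data 0)

theorem pvZ_perm (data : List (Int × List (Int × Int))) (e : Int × Int) :
    (pvZ data e).Perm
      ((cartesianVH e.1 e.2).flatMap (fun nb => (pvCR data).getD nb [])) := by
  have hc : (cartesianVH e.1 e.2).flatMap (fun nb => (pvCR data).getD nb [])
      = (cartesianVH e.1 e.2).flatMap
          (fun nb => ((PySem.List.enumerate data 0).filter (fun p => p.2.2.contains nb)).map (·.1)) :=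
    List.flatMap_congr (fun nb _ => pvCR_getD data nb)
  rw [hc]
  exact (pvTrans (cartesianVH e.1 e.2) (PySem.List.enumerate data 0)
    (fun nb p => p.2.2.contains nb) (fun p => p.1)).symm

theorem pvSorted (data : List (Int × List (Int × Int))) (e : Int × Int) :
    PySem.List.sorted ((cartesianVH e.1 e.2).flatMap (fun nb => (pvCR data).getD nb []))
      (fun i => i) false = pvZ data e :=
  PySem.List.sorted_id_eq_of_perm_of_pairwise _ _ (pvZ_perm data e) (pvZ_pairwise data e)

theorem pvMapLbl (data : List (Int × List (Int × Int))) (e : Int × Int) :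
    (pvZ data e).map (fun i =>
        "Room - " ++ PySem.Int.toStr ((PySem.List.pyGet? data i).getD (0, [])).1)
      = pvL data e := by
  unfold pvZ pvL
  rw [List.map_flatMap]
  rw [List.flatMap_congr (g := fun p => pvRow e p.2) ?_]
  · rw [show (PySem.List.enumerate data 0).flatMap (fun p => pvRow e p.2)
        = ((PySem.List.enumerate data 0).map (·.2)).flatMap (pvRow e) by
        rw [List.flatMap_map],
      PySem.List.map_snd_enumerate]
  · intro p hp
    rcases (PySem.List.mem_enumerate_iff _ _ _).mp hp with ⟨k, hk, rfl⟩
    rw [List.map_replicate]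
    have hget : (PySem.List.pyGet? data ((0 : Int) + (k : Int))).getD (0, []) = data[k] := by
      simp [hk]
    simp only [hget]
    unfold pvRow pvLbl
    rw [List.map_const', List.countP_eq_length_filter]

theorem pvBside (data : List (Int × List (Int × Int))) (exit : List (Int × Int)) :
    adjacent_room_alt data exit = (pvFA data exit).items.map (fun p => (p.1.1, p.1.2, p.2)) := by
  have hval : ∀ e : Int × Int,
      (PySem.List.sorted ([(e.1 - 1, e.2), (e.1, e.2 - 1), (e.1, e.2 + 1), (e.1 + 1, e.2)].foldl
          (fun (hits : List Int) nb => hits ++ (pvCR data).getD nb []) []) (fun i => i) false).map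
        (fun i => "Room - " ++ PySem.Int.toStr ((PySem.List.pyGet? data i).getD (0, [])).1)
        = pvL data e := by
    intro e
    rw [PySem.List.foldl_append_eq_flatMap, List.nil_append]
    rw [show ([(e.1 - 1, e.2), (e.1, e.2 - 1), (e.1, e.2 + 1), (e.1 + 1, e.2)] : List (Int × Int))
        = cartesianVH e.1 e.2 from rfl]
    rw [pvSorted, pvMapLbl]
  have h : adjacent_room_alt data exit
      = (exit.foldl (fun (er : PySem.Dict (Int × Int) (List String)) e =>
            er.insert e ((PySem.List.sorted
              ([(e.1 - 1, e.2), (e.1, e.2 - 1), (e.1, e.2 + 1), (e.1 + 1, e.2)].foldl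
                (fun (hits : List Int) nb => hits ++ (pvCR data).getD nb []) []) (fun i => i) false).map
              (fun i => "Room - " ++ PySem.Int.toStr ((PySem.List.pyGet? data i).getD (0, [])).1)))
          PySem.Dict.empty).items.map (fun p => (p.1.1, p.1.2, p.2)) := rfl
  rw [h]
  unfold pvFA
  refine congrArg _ (congrArg _ ?_)
  apply PySem.List.foldl_congr_mem
  intro d e _
  rw [hval e]

-- ===== VERDICT =====
theorem adjacent_room_spec : Claim_equal_adjacent_room := by
  intro data exit _
  show adjacent_room data exit = adjacent_room_alt data exit
  rw [pvAside, pvBside]
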